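-- pv_equiv track=rewrite | github.com/sarthak263/Projects | codesignal/reverseOddCount/reverseOddCount.py | reverseOddCount
-- ===== SOURCE A (Python) =====
-- def reverseOddCount(str):
--     l1 = [j for j in range(len(str)) if(str.count(str[j])%2==0)]# [4,7]
--     res = [None]*len(str)
--     for s in range(len(l1)):
--         res.insert(l1[s],str[l1[s]])
--     j = len(str)-1
--     for i in range(len(str)):
--         if not (i in l1):
--             while(True):
--                 if(j in l1):
--                     j-=1
--                 else:
--                     break
--             res.insert(j,str[i])
--             j-=1
--     res = list(filter(None,res))
--     return "".join(res)
-- ===== SOURCE B (Python) =====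
-- def reverseOddCount(str):
--     cnt = {}
--     for ch in str:
--         cnt[ch] = cnt.get(ch, 0) + 1
--     rev = [ch for ch in reversed(str) if cnt[ch] % 2 == 1]
--     it = iter(rev)
--     return "".join(ch if cnt[ch] % 2 == 0 else next(it) for ch in str)
-- ===== Notes on version B (the rewrite author's own statement) =====
-- stated objective: faster
-- what changed: Replaces the per-index str.count scans and repeated list.insert shuffling of a None-padded buffer with a single counting pass plus one zip-like pass that substitutes the odd-count characters by the same characters taken in reverse order.
import Mathlib
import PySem

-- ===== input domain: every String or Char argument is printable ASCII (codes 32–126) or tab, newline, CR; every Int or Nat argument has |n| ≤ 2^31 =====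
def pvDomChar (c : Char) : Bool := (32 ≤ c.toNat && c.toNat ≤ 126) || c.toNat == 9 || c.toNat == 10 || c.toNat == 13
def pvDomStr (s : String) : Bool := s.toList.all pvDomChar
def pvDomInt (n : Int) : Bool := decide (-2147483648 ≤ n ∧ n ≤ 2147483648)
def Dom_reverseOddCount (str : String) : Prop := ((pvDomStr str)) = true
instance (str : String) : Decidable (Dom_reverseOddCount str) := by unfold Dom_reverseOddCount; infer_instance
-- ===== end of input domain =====

-- B replaces A's per-index str.count scans and repeated list.insert shuffling with one counting
-- pass plus one substitution pass (odd-count characters taken in reverse order): measured faster (asymptotic).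


-- ===== PORT A =====
-- A's `while True: if j in l1: j -= 1 else: break`; the fuel (length+1) always suffices on A's runs.
def skipA (l1 : List Int) : Nat → Int → Int
  | 0, j => j
  | fuel+1, j => if l1.contains j then skipA l1 fuel (j-1) else j

-- l1 = [j for j in range(len(str)) if str.count(str[j]) % 2 == 0]
def pvL1 (cs : List Char) : List Int :=
  (PySem.List.pyRange 0 cs.length 1).filter
    (fun j => PySem.Chars.count cs [PySem.List.pyGetD cs j ' '] % 2 == 0)

-- res after the first for-loop (res = [None]*len(str); insertions at l1[s])
def pvRes1 (cs : List Char) : List (Option Char) :=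
  (PySem.List.pyRange 0 ((pvL1 cs).length : Int) 1).foldl
    (fun res s => PySem.List.insert res (PySem.List.pyGetD (pvL1 cs) s 0)
        (some (PySem.List.pyGetD cs (PySem.List.pyGetD (pvL1 cs) s 0) ' '))) 
    (List.replicate cs.length (none : Option Char))

-- one iteration of the second for-loop (state = (res, j))
def pvStep (cs : List Char) (st : List (Option Char) × Int) (i : Int) : List (Option Char) × Int :=
  if (pvL1 cs).contains i then st
  else
    let j := skipA (pvL1 cs) (cs.length + 1) st.2
    (PySem.List.insert st.1 j (some (PySem.List.pyGetD cs i ' ')), j - 1)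

def reverseOddCount (str : String) : String :=
  let cs := str.toList
  let st := (PySem.List.pyRange 0 cs.length 1).foldl (pvStep cs) (pvRes1 cs, (cs.length : Int) - 1)
  String.ofList (st.1.filterMap id)

-- ===== PORT B =====
-- cnt = {}; for ch in str: cnt[ch] = cnt.get(ch, 0) + 1
def pvCnt (cs : List Char) : PySem.Dict Char Int :=
  cs.foldl (fun d ch => d.insert ch (d.getD ch 0 + 1)) PySem.Dict.empty

-- rev = [ch for ch in reversed(str) if cnt[ch] % 2 == 1]
def pvRev (cs : List Char) : List Char :=
  cs.reverse.filter (fun ch => (pvCnt cs).getD ch 0 % 2 == 1)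

-- "".join(ch if cnt[ch] % 2 == 0 else next(it) for ch in str); state = (out, iterator rest)
def pvBStep (cs : List Char) (st : List Char × List Char) (ch : Char) : List Char × List Char :=
  if (pvCnt cs).getD ch 0 % 2 == 0 then (st.1 ++ [ch], st.2)
  else
    match st.2 with
    | x :: r => (st.1 ++ [x], r)
    | [] => (st.1 ++ [ch], [])   -- unreachable: `next(it)` is never called past the end

def reverseOddCount_alt (str : String) : String :=
  let cs := str.toList
  String.ofList ((cs.foldl (pvBStep cs) ([], pvRev cs)).1)

-- ===== PRECONDITION & SPEC =====
def Spec_reverseOddCount (str : String) (out : String) : Prop := out = reverseOddCount_alt str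
instance (str : String) (out : String) : Decidable (Spec_reverseOddCount str out) := by unfold Spec_reverseOddCount; infer_instance

-- ===== CLAIM (what is proved, stated in full; the proofs are below) =====
def Claim_equal_reverseOddCount : Prop := ∀ (str : String), Dom_reverseOddCount str → Spec_reverseOddCount str (reverseOddCount str)

-- ===== LEMMAS AND PROOFS =====

-- proof-side vocabulary -----------------------------------------------------
-- "position p holds a character of even total count"
def pvQ (cs : List Char) (p : Nat) : Bool := cs.count (cs.getD p ' ') % 2 == 0
-- skeleton entry of A's buffer after the first loop
def pvSkel (cs : List Char) (p : Nat) : Option Char :=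
  if pvQ cs p then some (cs.getD p ' ') else none
-- odd-count positions, increasing
def pvO (cs : List Char) : List Nat := (List.range cs.length).filter (fun p => !pvQ cs p)
def pvOA (cs : List Char) (u : Nat) : Nat := (pvO cs).getD u cs.length
-- number of odd-count positions strictly below i
def pvT (cs : List Char) (i : Nat) : Nat := ((List.range i).filter (fun p => !pvQ cs p)).length
-- the common result: even-count positions keep their character, odd-count positions
-- receive the odd-count subsequence reversed
def pvB (cs : List Char) : List Char :=
  (List.range cs.length).map (fun p =>
    if pvQ cs p then cs.getD p ' '
    else cs.getD (pvOA cs ((pvO cs).length - 1 - (pvO cs).idxOf p)) ' ')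
-- phase-1 insertion step, on the Nat side
def pvIns (cs : List Char) (res : List (Option Char)) (p : Nat) : List (Option Char) :=
  PySem.List.insert res (p : Int) (some (PySem.List.pyGetD cs (p : Int) ' '))
-- the phase-2 loop invariant of A: before iteration i the buffer is the untouched
-- skeleton below position pvOA (m - t) followed by frozen material whose non-None
-- entries read exactly like pvB from that position on
def pvInv (cs : List Char) (i : Nat) (st : List (Option Char) × Int) : Prop :=
  st.2 = (pvOA cs ((pvO cs).length - pvT cs i) : Int) - 1 ∧
  ∃ Z, st.1 = (List.range (pvOA cs ((pvO cs).length - pvT cs i))).map (pvSkel cs) ++ Z ∧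
       Z.filterMap id = (pvB cs).drop (pvOA cs ((pvO cs).length - pvT cs i))

-- Python str.count with a single-character needle is List.count
theorem pv_go_singleton (c : Char) (l : List Char) (f : Nat) (acc : Nat) (hf : l.length ≤ f) :
    PySem.Chars.count.go [c] f l acc = acc + l.count c := by
  induction l generalizing f acc with
  | nil => cases f <;> simp [PySem.Chars.count.go]
  | cons h t ih =>
    cases f with
    | zero => simp at hf
    | succ f =>
      simp only [PySem.Chars.count.go]
      by_cases hc : c = h
      · subst hc
        simp [List.isPrefixOf, ih, Nat.le_of_succ_le_succ hf]
        omega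
      · simp [List.isPrefixOf, hc, ih, Nat.le_of_succ_le_succ hf, Ne.symm hc]

theorem pv_count_singleton (cs : List Char) (c : Char) :
    PySem.Chars.count cs [c] = cs.count c := by
  simp [PySem.Chars.count, pv_go_singleton c cs cs.length 0 le_rfl]

theorem pv_parity0 (k : Nat) : (((k : Int) % 2 == 0)) = (k % 2 == 0) := by
  rcases Nat.mod_two_eq_zero_or_one k with h | h <;>
    · have h2 : (k : Int) % 2 = ((k % 2 : Nat) : Int) := by omega
      simp [h2, h]

theorem pv_parity1 (k : Nat) : (((k : Int) % 2 == 1)) = !(k % 2 == 0) := by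
  rcases Nat.mod_two_eq_zero_or_one k with h | h <;>
    · have h2 : (k : Int) % 2 = ((k % 2 : Nat) : Int) := by omega
      simp [h2, h]

-- filtering a list by a predicate on its elements, through positions
theorem pv_pos_filter {α : Type} (xs : List α) (d : α) (q : α → Bool) :
    xs.filter q = ((List.range xs.length).filter (fun p => q (xs.getD p d))).map
      (fun p => xs.getD p d) := by
  induction xs with
  | nil => simp
  | cons x t ih =>
    simp only [List.length_cons, List.range_succ_eq_map, List.filter_cons, List.getD_cons_zero,
      List.filter_map]
    by_cases hq : q x = true
    · simp only [hq, if_pos]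
      refine congrArg (x :: ·) ?_
      rw [ih]
      simp [Function.comp_def]
    · simp only [Bool.not_eq_true] at hq
      simp only [hq]
      rw [ih]
      simp [Function.comp_def]

theorem pvL1_eq (cs : List Char) :
    pvL1 cs = ((List.range cs.length).filter (fun p => pvQ cs p)).map
      (fun p : Nat => (p : Int)) := by
  unfold pvL1
  rw [PySem.List.pyRange_one, List.filter_map]
  refine Eq.trans (congrArg _ (List.filter_congr ?_)) (List.map_congr_left ?_)
  · intro p hp
    simp [pv_count_singleton, pvQ]
  · intro p hp; simp

theorem pv_mem_L1 (cs : List Char) (x : Int) :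
    (pvL1 cs).contains x = true ↔ ∃ p : Nat, x = (p : Int) ∧ p < cs.length ∧ pvQ cs p = true := by
  rw [pvL1_eq]
  simp only [List.contains_iff_mem, List.mem_map, List.mem_filter, List.mem_range]
  constructor
  · rintro ⟨p, ⟨hp, hq⟩, rfl⟩; exact ⟨p, rfl, hp, hq⟩
  · rintro ⟨p, rfl, hp, hq⟩; exact ⟨p, ⟨hp, hq⟩, rfl⟩

theorem pv_cnt_getD (cs : List Char) (ch : Char) :
    (pvCnt cs).getD ch 0 = (cs.count ch : Int) := by
  unfold pvCnt
  rw [PySem.Dict.getD_foldl_insert_add_one]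
  simp

theorem pvRev_eq (cs : List Char) :
    pvRev cs = ((pvO cs).map (fun p => cs.getD p ' ')).reverse := by
  unfold pvRev
  rw [List.filter_reverse]
  rw [List.filter_congr (q := fun ch => !(cs.count ch % 2 == 0))
    (fun ch _ => by rw [pv_cnt_getD, pv_parity1])]
  rw [pv_pos_filter cs ' ' _]
  unfold pvO pvQ
  simp


theorem pvO_pairwise (cs : List Char) : (pvO cs).Pairwise (· < ·) :=
  (List.pairwise_lt_range).filter _

theorem pvO_mem (cs : List Char) (p : Nat) :
    p ∈ pvO cs ↔ p < cs.length ∧ ¬ pvQ cs p = true := by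
  simp [pvO]

theorem pvOA_getElem (cs : List Char) (u : Nat) (hu : u < (pvO cs).length) :
    pvOA cs u = (pvO cs)[u] := List.getD_eq_getElem _ _ hu

theorem pvOA_len (cs : List Char) : pvOA cs (pvO cs).length = cs.length :=
  List.getD_eq_default _ _ le_rfl

theorem pvOA_lt (cs : List Char) (u : Nat) (hu : u < (pvO cs).length) :
    pvOA cs u < cs.length ∧ ¬ pvQ cs (pvOA cs u) = true := by
  rw [pvOA_getElem cs u hu]
  exact (pvO_mem cs _).mp (List.getElem_mem _)

theorem pvOA_mono (cs : List Char) (u v : Nat) (huv : u < v) (hv : v ≤ (pvO cs).length)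
    (hu : u < (pvO cs).length) : pvOA cs u < pvOA cs v := by
  rcases lt_or_eq_of_le hv with hv' | hv'
  · have h := (List.pairwise_iff_getElem.mp (pvO_pairwise cs)) u v hu hv' huv
    rwa [pvOA_getElem cs u hu, pvOA_getElem cs v hv']
  · subst hv'
    rw [pvOA_len]
    exact (pvOA_lt cs u hu).1


theorem pvOA_le_of_le (cs : List Char) (u v : Nat) (huv : u ≤ v) (hv : v ≤ (pvO cs).length) :
    pvOA cs u ≤ pvOA cs v := by
  rcases Nat.eq_or_lt_of_le huv with h | h
  · subst h; exact le_rfl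
  · exact le_of_lt (pvOA_mono cs u v h hv (by omega))

-- positions strictly between pvOA u and pvOA (u+1) are even
theorem pv_between (cs : List Char) (u p : Nat) (hu : u < (pvO cs).length)
    (hlo : pvOA cs u < p) (hhi : p < pvOA cs (u+1)) (hn : p < cs.length) :
    pvQ cs p = true := by
  by_contra hodd
  obtain ⟨v, hv, hvp⟩ := List.getElem_of_mem ((pvO_mem cs p).mpr ⟨hn, hodd⟩)
  have hvp' : pvOA cs v = p := by rw [pvOA_getElem cs v hv, hvp]
  have huv : u < v := by
    by_contra hle
    have := pvOA_le_of_le cs v u (by omega) (by omega)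
    omega
  have := pvOA_le_of_le cs (u+1) v (by omega) (by omega)
  omega

-- positions below the first odd position are even
theorem pv_below (cs : List Char) (p : Nat) (hp : p < pvOA cs 0) (hn : p < cs.length) :
    pvQ cs p = true := by
  by_contra hodd
  obtain ⟨v, hv, hvp⟩ := List.getElem_of_mem ((pvO_mem cs p).mpr ⟨hn, hodd⟩)
  have hvp' : pvOA cs v = p := by rw [pvOA_getElem cs v hv, hvp]
  have := pvOA_le_of_le cs 0 v (by omega) (by omega)
  omega

theorem pvT_succ (cs : List Char) (i : Nat) :
    pvT cs (i+1) = pvT cs i + (if pvQ cs i then 0 else 1) := by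
  unfold pvT
  rw [List.range_succ, List.filter_append]
  by_cases hq : pvQ cs i = true <;> simp [hq]

theorem pvO_split (cs : List Char) (i : Nat) (hi : i ≤ cs.length) :
    pvO cs = ((List.range i).filter (fun p => !pvQ cs p)) ++
      ((List.range' i (cs.length - i)).filter (fun p => !pvQ cs p)) := by
  unfold pvO
  rw [← List.filter_append]
  congr 1
  rw [List.range_eq_range', List.range_eq_range']
  have h := List.range'_append (s:=0) (m:=i) (n:=cs.length - i) (step:=1)
  simp only [Nat.one_mul, Nat.zero_add] at h
  rw [h, Nat.add_sub_cancel' hi]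

theorem pvT_lt (cs : List Char) (i : Nat) (hi : i < cs.length) (hodd : ¬ pvQ cs i = true) :
    pvT cs i < (pvO cs).length ∧ pvOA cs (pvT cs i) = i ∧ (pvO cs).idxOf i = pvT cs i := by
  have hsplit := pvO_split cs i (le_of_lt hi)
  have hcons : List.range' i (cs.length - i) = i :: List.range' (i+1) (cs.length - i - 1) := by
    obtain ⟨k, hk⟩ : ∃ k, cs.length - i = k + 1 := ⟨cs.length - i - 1, by omega⟩
    rw [hk, List.range'_succ]
    congr 1
  rw [hcons, List.filter_cons, if_pos (Bool.not_iff_not.mpr hodd)] at hsplit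
  have hlen : (pvO cs).length = pvT cs i + (1 + (List.filter (fun p => !pvQ cs p) (List.range' (i+1) (cs.length - i - 1))).length) := by
    rw [hsplit]; simp [pvT]; omega
  refine ⟨by omega, ?_, ?_⟩
  · rw [pvOA, hsplit]
    show List.getD (_ ++ i :: _) (pvT cs i) _ = i
    rw [show pvT cs i = (List.filter (fun p => !pvQ cs p) (List.range i)).length from by simp [pvT]]
    rw [List.getD_eq_getElem _ _ (by simp)]
    simp
  · rw [hsplit, List.idxOf_append_of_notMem, List.idxOf_cons_self]
    · simp [pvT]
    · intro hmem
      have := List.mem_range.mp (List.mem_of_mem_filter hmem)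
      omega

theorem pv_drop_range (m n : Nat) (h : m ≤ n) :
    (List.range n).drop m = List.range' m (n - m) := by
  apply List.ext_getElem (by simp) (fun i h1 h2 => by
    simp [List.getElem_range'])

theorem pv_take_range (m n : Nat) (h : m ≤ n) :
    (List.range n).take m = List.range m := by
  apply List.ext_getElem (by simp [Nat.min_eq_left h]) (fun i h1 h2 => by simp)

theorem pvB_length (cs : List Char) : (pvB cs).length = cs.length := by simp [pvB]

theorem pvB_getD_even (cs : List Char) (p : Nat) (hp : p < cs.length) (hq : pvQ cs p = true) :
    (pvB cs).getD p ' ' = cs.getD p ' ' := by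
  rw [List.getD_eq_getElem _ _ (by rw [pvB_length]; exact hp)]
  simp [pvB, hq]

theorem pvB_getD_odd (cs : List Char) (p : Nat) (hp : p < cs.length) (hq : ¬ pvQ cs p = true) :
    (pvB cs).getD p ' ' =
      cs.getD (pvOA cs ((pvO cs).length - 1 - pvT cs p)) ' ' := by
  rw [List.getD_eq_getElem _ _ (by rw [pvB_length]; exact hp)]
  have hidx := (pvT_lt cs p hp hq).2.2
  simp [pvB, hq, hidx]

theorem pv_fm (cs : List Char) (l : List Nat) :
    (l.map (pvSkel cs)).filterMap id = (l.filter (pvQ cs)).map (fun p => cs.getD p ' ') := by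
  induction l with
  | nil => simp
  | cons x t ih =>
    simp only [id_eq] at ih
    by_cases hq : pvQ cs x = true
    · simp only [List.map_cons, List.filterMap_cons, pvSkel, hq, if_pos, List.filter_cons,
        id_eq]
      rw [ih]
    · simp only [List.map_cons, List.filterMap_cons, pvSkel, hq, Bool.false_eq_true, if_false,
        List.filter_cons, id_eq]
      rw [ih]


theorem pv_ph1 (cs : List Char) (k b t : Nat) (hk : b + k = cs.length) :
    (((List.range cs.length).drop b).filter (pvQ cs)).foldl (pvIns cs)
      ((List.range b).map (pvSkel cs) ++ List.replicate (k + t) (none : Option Char))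
    = (List.range cs.length).map (pvSkel cs) ++
        List.replicate ((((List.range cs.length).drop b).filter (pvQ cs)).length + t)
          (none : Option Char) := by
  induction k generalizing b t with
  | zero =>
    have hb : b = cs.length := by omega
    subst hb
    rw [List.drop_eq_nil_of_le (by simp)]
    simp
  | succ k ih =>
    have hb : b < cs.length := by omega
    have hdrop : (List.range cs.length).drop b = b :: (List.range cs.length).drop (b + 1) := by
      rw [List.drop_eq_getElem_cons (by simpa using hb)]
      simp
    rw [hdrop]
    by_cases hq : pvQ cs b = true
    · rw [List.filter_cons, if_pos hq]
      rw [List.foldl_cons]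
      have hins : pvIns cs
          ((List.range b).map (pvSkel cs) ++ List.replicate (k + 1 + t) (none : Option Char)) b
          = (List.range (b+1)).map (pvSkel cs) ++ List.replicate (k + (t+1)) (none : Option Char) := by
        unfold pvIns
        rw [PySem.List.insert_natCast _ _ _ (by simp)]
        rw [List.take_left' (by simp), List.drop_left' (by simp)]
        rw [List.range_succ, List.map_append, show k+1+t = k+(t+1) by omega]
        simp [pvSkel, hq, List.append_assoc]
      rw [hins, ih (b+1) (t+1) (by omega)]
      simp only [List.length_cons]
      congr 2
      omega
    · rw [List.filter_cons, if_neg hq]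
      have hinit : (List.range b).map (pvSkel cs) ++ List.replicate (k + 1 + t) (none : Option Char)
          = (List.range (b+1)).map (pvSkel cs) ++ List.replicate (k + t) (none : Option Char) := by
        rw [List.range_succ, List.map_append, show k+1+t = (k+t)+1 by omega]
        simp [pvSkel, hq, List.replicate_succ, List.append_assoc]
      rw [hinit, ih (b+1) t (by omega)]


theorem pvRes1_eq (cs : List Char) :
    pvRes1 cs = (List.range cs.length).map (pvSkel cs) ++
      List.replicate (pvL1 cs).length (none : Option Char) := by
  unfold pvRes1
  rw [PySem.List.foldl_pyRange_zero_pyGetD' (pvL1 cs) 0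
    (fun res e => PySem.List.insert res e (some (PySem.List.pyGetD cs e ' ')))
    (List.replicate cs.length (none : Option Char))]
  rw [pvL1_eq, List.foldl_map]
  have h := pv_ph1 cs cs.length 0 0 (by omega)
  simp only [List.drop_zero] at h
  unfold pvIns at h
  convert h using 2
  simp


theorem pv_skipA (l1 : List Int) (f : Nat) (j q : Int)
    (hq : q ≤ j) (hmem : ∀ x, q < x → x ≤ j → l1.contains x = true)
    (hnq : l1.contains q = false) (hf : j - q < (f : Int)) :
    skipA l1 f j = q := by
  induction f generalizing j with
  | zero => omega
  | succ f ih =>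
    by_cases hjq : j = q
    · subst hjq
      rw [skipA, hnq]
      simp
    · have hlt : q < j := by omega
      simp only [skipA, hmem j hlt le_rfl, if_pos]
      exact ih (j-1) (by omega) (fun x h1 h2 => hmem x h1 (by omega)) (by omega)

theorem pvOA_le_len (cs : List Char) (u : Nat) : pvOA cs u ≤ cs.length := by
  by_cases hu : u < (pvO cs).length
  · exact le_of_lt (pvOA_lt cs u hu).1
  · rw [pvOA, List.getD_eq_default _ _ (by omega)]

-- drop k of pvB, as an explicit window of positions
theorem pv_drop_pvB (cs : List Char) (k : Nat) (hk : k ≤ cs.length) :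
    (pvB cs).drop k = (List.range' k (cs.length - k)).map (fun p =>
      if pvQ cs p then cs.getD p ' '
      else cs.getD (pvOA cs ((pvO cs).length - 1 - (pvO cs).idxOf p)) ' ') := by
  rw [pvB, ← List.map_drop, pv_drop_range k cs.length hk]

theorem pv_take_pvB (cs : List Char) (k : Nat) (hk : k ≤ cs.length) :
    (pvB cs).take k = (List.range k).map (fun p =>
      if pvQ cs p then cs.getD p ' '
      else cs.getD (pvOA cs ((pvO cs).length - 1 - (pvO cs).idxOf p)) ' ') := by
  rw [pvB, ← List.map_take, pv_take_range k cs.length hk]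

theorem pv_inv_zero (cs : List Char) :
    pvInv cs 0 (pvRes1 cs, (cs.length : Int) - 1) := by
  have ht : pvT cs 0 = 0 := by simp [pvT]
  have hOA : pvOA cs ((pvO cs).length - pvT cs 0) = cs.length := by
    rw [ht, Nat.sub_zero, pvOA_len]
  refine ⟨by rw [hOA], List.replicate (pvL1 cs).length (none : Option Char), ?_, ?_⟩
  · rw [hOA]
    exact pvRes1_eq cs
  · rw [hOA, List.drop_eq_nil_of_le (by rw [pvB_length])]
    simp

theorem pv_fm_some (c : Char) (W : List (Option Char)) :
    List.filterMap id (some c :: W) = c :: List.filterMap id W := rfl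

theorem pv_fm_none (W : List (Option Char)) :
    List.filterMap id ((none : Option Char) :: W) = List.filterMap id W := rfl

theorem pv_oaInj (cs : List Char) (u v : Nat) (hu : u < (pvO cs).length)
    (hv : v < (pvO cs).length) (h : pvOA cs u = pvOA cs v) : u = v := by
  by_contra hne
  rcases Nat.lt_or_ge u v with hlt | hge
  · have := pvOA_mono cs u v hlt (by omega) hu; omega
  · have := pvOA_mono cs v u (by omega) (by omega) hv; omega

theorem pv_inv_step (cs : List Char) (i : Nat) (hi : i < cs.length)
    (st : List (Option Char) × Int)
    (h : pvInv cs i st) : pvInv cs (i+1) (pvStep cs st (i : Int)) := by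
  obtain ⟨hj, Z, hres, hZ⟩ := h
  by_cases hq : pvQ cs i = true
  · have hcon : (pvL1 cs).contains (i : Int) = true :=
      (pv_mem_L1 cs _).mpr ⟨i, rfl, hi, hq⟩
    rw [pvStep, if_pos hcon]
    have ht : pvT cs (i+1) = pvT cs i := by rw [pvT_succ, hq]; simp
    rw [pvInv, ht]
    exact ⟨hj, Z, hres, hZ⟩
  · -- odd position: one insertion happens
    have hcon : (pvL1 cs).contains (i : Int) = false := by
      cases hb : (pvL1 cs).contains (i : Int) with
      | false => rfl
      | true =>
        obtain ⟨p, hp1, hp2, hp3⟩ := (pv_mem_L1 cs _).mp hb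
        have : p = i := by exact_mod_cast hp1.symm
        subst this
        exact absurd hp3 hq
    obtain ⟨htm, hOAt, _⟩ := pvT_lt cs i hi hq
    have hmt : (pvO cs).length - pvT cs i - 1 < (pvO cs).length := by omega
    obtain ⟨hqn, hqodd⟩ := pvOA_lt cs _ hmt
    have hsucc : (pvO cs).length - pvT cs i - 1 + 1 = (pvO cs).length - pvT cs i := by omega
    have hqL : pvOA cs ((pvO cs).length - pvT cs i - 1) < pvOA cs ((pvO cs).length - pvT cs i) := by
      have := pvOA_mono cs ((pvO cs).length - pvT cs i - 1) ((pvO cs).length - pvT cs i)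
        (by omega) (by omega) hmt
      exact this
    have hLle : pvOA cs ((pvO cs).length - pvT cs i) ≤ cs.length := pvOA_le_len cs _
    -- what the skip loop lands on
    have hbetween : ∀ x : Nat, pvOA cs ((pvO cs).length - pvT cs i - 1) < x →
        x < pvOA cs ((pvO cs).length - pvT cs i) → pvQ cs x = true := by
      intro x h1 h2
      exact pv_between cs _ x hmt h1 (by rwa [hsucc]) (by omega)
    have hskip : skipA (pvL1 cs) (cs.length + 1) st.2
        = ((pvOA cs ((pvO cs).length - pvT cs i - 1) : Nat) : Int) := by
      rw [hj]
      apply pv_skipA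
      · omega
      · intro x hx1 hx2
        have hx0 : (0 : Int) ≤ x := by omega
        obtain ⟨p, rfl⟩ : ∃ p : Nat, x = (p : Nat) := ⟨x.toNat, by omega⟩
        have hpn : p < pvOA cs ((pvO cs).length - pvT cs i) := by omega
        exact (pv_mem_L1 cs _).mpr ⟨p, rfl, by omega, hbetween p (by omega) hpn⟩
      · cases hb : (pvL1 cs).contains ((pvOA cs ((pvO cs).length - pvT cs i - 1) : Nat) : Int) with
        | false => rfl
        | true =>
          obtain ⟨p, hp1, hp2, hp3⟩ := (pv_mem_L1 cs _).mp hb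
          have : p = pvOA cs ((pvO cs).length - pvT cs i - 1) := by exact_mod_cast hp1.symm
          subst this
          exact absurd hp3 hqodd
      · push_cast
        omega
    rw [pvStep, if_neg (by rw [hcon]; simp)]
    simp only [hskip]
    have htsucc : pvT cs (i+1) = pvT cs i + 1 := by rw [pvT_succ]; simp [hq]
    have hidx : (pvO cs).length - pvT cs (i+1) = (pvO cs).length - pvT cs i - 1 := by omega
    refine ⟨by rw [hidx], ?_⟩
    -- the insertion
    have hlen1 : pvOA cs ((pvO cs).length - pvT cs i - 1) ≤ st.1.length := by
      rw [hres]
      simp only [List.length_append, List.length_map, List.length_range]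
      omega
    rw [PySem.List.insert_natCast _ _ _ hlen1]
    have htake : st.1.take (pvOA cs ((pvO cs).length - pvT cs i - 1))
        = (List.range (pvOA cs ((pvO cs).length - pvT cs i - 1))).map (pvSkel cs) := by
      rw [hres, List.take_append_of_le_length (by simp; omega), ← List.map_take,
        pv_take_range _ _ (le_of_lt hqL)]
    have hdrop : st.1.drop (pvOA cs ((pvO cs).length - pvT cs i - 1))
        = (List.range' (pvOA cs ((pvO cs).length - pvT cs i - 1))
            (pvOA cs ((pvO cs).length - pvT cs i)
              - pvOA cs ((pvO cs).length - pvT cs i - 1))).map (pvSkel cs) ++ Z := by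
      rw [hres, List.drop_append_of_le_length (by simp; omega), ← List.map_drop,
        pv_drop_range _ _ (le_of_lt hqL)]
    rw [htake, hdrop, hidx]
    refine ⟨some (PySem.List.pyGetD cs (i : Int) ' ') ::
      ((List.range' (pvOA cs ((pvO cs).length - pvT cs i - 1))
            (pvOA cs ((pvO cs).length - pvT cs i)
              - pvOA cs ((pvO cs).length - pvT cs i - 1))).map (pvSkel cs) ++ Z), rfl, ?_⟩
    -- the filtered suffix reads like pvB from position q on
    have hc : PySem.List.pyGetD cs (i : Int) ' ' = cs.getD i ' ' := by simp
    have hqT : pvT cs (pvOA cs ((pvO cs).length - pvT cs i - 1))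
        = (pvO cs).length - pvT cs i - 1 := by
      obtain ⟨h1, h2, _⟩ := pvT_lt cs _ hqn hqodd
      exact pv_oaInj cs _ _ h1 hmt h2
    have hfb : (if pvQ cs (pvOA cs ((pvO cs).length - pvT cs i - 1)) = true then
          cs.getD (pvOA cs ((pvO cs).length - pvT cs i - 1)) ' '
        else cs.getD (pvOA cs ((pvO cs).length - 1 -
          (pvO cs).idxOf (pvOA cs ((pvO cs).length - pvT cs i - 1)))) ' ') = cs.getD i ' ' := by
      obtain ⟨h1, h2, h3⟩ := pvT_lt cs _ hqn hqodd
      simp only [if_neg hqodd, h3, hqT]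
      rw [show (pvO cs).length - 1 - ((pvO cs).length - pvT cs i - 1) = pvT cs i by omega,
        hOAt]
    -- decompose the freshly frozen block
    have hrange : List.range' (pvOA cs ((pvO cs).length - pvT cs i - 1))
          (pvOA cs ((pvO cs).length - pvT cs i) - pvOA cs ((pvO cs).length - pvT cs i - 1))
        = pvOA cs ((pvO cs).length - pvT cs i - 1) ::
          List.range' (pvOA cs ((pvO cs).length - pvT cs i - 1) + 1)
            (pvOA cs ((pvO cs).length - pvT cs i)
              - pvOA cs ((pvO cs).length - pvT cs i - 1) - 1) := by
      rw [show pvOA cs ((pvO cs).length - pvT cs i) - pvOA cs ((pvO cs).length - pvT cs i - 1)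
          = (pvOA cs ((pvO cs).length - pvT cs i) - pvOA cs ((pvO cs).length - pvT cs i - 1) - 1)
            + 1 by omega, List.range'_succ]
      simp
    rw [hrange, List.map_cons]
    rw [show pvSkel cs (pvOA cs ((pvO cs).length - pvT cs i - 1)) = none from by
      rw [pvSkel, if_neg hqodd]]
    rw [pv_fm_some, List.filterMap_append, pv_fm_none, pv_fm cs]
    have hall : ∀ x ∈ List.range' (pvOA cs ((pvO cs).length - pvT cs i - 1) + 1)
        (pvOA cs ((pvO cs).length - pvT cs i) - pvOA cs ((pvO cs).length - pvT cs i - 1) - 1),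
        pvQ cs x = true := by
      intro x hx
      obtain ⟨hx1, hx2⟩ := List.mem_range'_1.mp hx
      exact hbetween x (by omega) (by omega)
    rw [List.filter_eq_self.mpr hall, hZ]
    -- now compute (pvB).drop q
    rw [pv_drop_pvB cs _ (by omega)]
    rw [pv_drop_pvB cs (pvOA cs ((pvO cs).length - pvT cs i - 1)) (by omega)]
    rw [show cs.length - pvOA cs ((pvO cs).length - pvT cs i - 1)
        = (cs.length - pvOA cs ((pvO cs).length - pvT cs i - 1) - 1) + 1 by omega,
      List.range'_succ, List.map_cons, hfb, hc]
    congr 1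
    have hsplit : List.range' (pvOA cs ((pvO cs).length - pvT cs i - 1) + 1)
          (cs.length - pvOA cs ((pvO cs).length - pvT cs i - 1) - 1)
        = List.range' (pvOA cs ((pvO cs).length - pvT cs i - 1) + 1)
            (pvOA cs ((pvO cs).length - pvT cs i) - pvOA cs ((pvO cs).length - pvT cs i - 1) - 1)
          ++ List.range' (pvOA cs ((pvO cs).length - pvT cs i))
              (cs.length - pvOA cs ((pvO cs).length - pvT cs i)) := by
      have h := List.range'_append
        (s := pvOA cs ((pvO cs).length - pvT cs i - 1) + 1)
        (m := pvOA cs ((pvO cs).length - pvT cs i) - pvOA cs ((pvO cs).length - pvT cs i - 1) - 1)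
        (n := cs.length - pvOA cs ((pvO cs).length - pvT cs i)) (step := 1)
      rw [show pvOA cs ((pvO cs).length - pvT cs i - 1) + 1 + 1 *
          (pvOA cs ((pvO cs).length - pvT cs i) - pvOA cs ((pvO cs).length - pvT cs i - 1) - 1)
          = pvOA cs ((pvO cs).length - pvT cs i) by omega] at h
      rw [h]
      congr 1
      omega
    rw [hsplit, List.map_append]
    congr 1
    apply List.map_congr_left
    intro x hx
    rw [if_pos (hall x hx)]


theorem pv_loop2 (cs : List Char) (i : Nat) (hi : i ≤ cs.length) :
    pvInv cs i ((PySem.List.pyRange 0 (i : Int) 1).foldl (pvStep cs)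
      (pvRes1 cs, (cs.length : Int) - 1)) := by
  induction i with
  | zero => simpa [PySem.List.pyRange_one_eq_nil] using pv_inv_zero cs
  | succ i ih =>
    have h1 : ((i : Int) + 1) = ((i + 1 : Nat) : Int) := by push_cast; ring
    rw [← h1, PySem.List.pyRange_one_succ_right (by positivity), List.foldl_append,
      List.foldl_cons, List.foldl_nil]
    exact pv_inv_step cs i (by omega) _ (ih (by omega))

theorem pv_portA (cs : List Char) :
    (((PySem.List.pyRange 0 cs.length 1).foldl (pvStep cs)
       (pvRes1 cs, (cs.length : Int) - 1)).1).filterMap id = pvB cs := by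
  obtain ⟨hj, Z, hres, hZ⟩ := pv_loop2 cs cs.length le_rfl
  have htm : pvT cs cs.length = (pvO cs).length := rfl
  rw [htm, Nat.sub_self] at hres hZ
  have hk : pvOA cs 0 ≤ cs.length := pvOA_le_len cs 0
  have hbelow : ∀ p ∈ List.range (pvOA cs 0), pvQ cs p = true := fun p hp =>
    pv_below cs p (List.mem_range.mp hp) (lt_of_lt_of_le (List.mem_range.mp hp) hk)
  rw [hres, List.filterMap_append, pv_fm cs, List.filter_eq_self.mpr hbelow, hZ]
  have htake : (List.range (pvOA cs 0)).map (fun p => cs.getD p ' ') = (pvB cs).take (pvOA cs 0) := by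
    rw [pv_take_pvB cs _ hk]
    apply List.map_congr_left
    intro p hp
    rw [if_pos (hbelow p hp)]
  rw [htake, List.take_append_drop]

theorem pv_R_len (cs : List Char) : (pvRev cs).length = (pvO cs).length := by
  rw [pvRev_eq]; simp

theorem pv_R_getD (cs : List Char) (t : Nat) (ht : t < (pvO cs).length) :
    (pvRev cs).getD t ' ' = cs.getD (pvOA cs ((pvO cs).length - 1 - t)) ' ' := by
  rw [pvRev_eq]
  rw [List.getD_eq_getElem _ _ (by simp [ht])]
  rw [List.getElem_reverse]
  simp only [List.getElem_map, List.length_map]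
  rw [← pvOA_getElem cs _ (by omega)]

theorem pv_getD_eq_getElem (cs : List Char) (i : Nat) (hi : i < cs.length) :
    cs.getD i ' ' = cs[i] := List.getD_eq_getElem _ _ hi

theorem pv_take_succ_pvB (cs : List Char) (i : Nat) (hi : i < cs.length) :
    (pvB cs).take (i+1) = (pvB cs).take i ++ [(pvB cs).getD i ' '] := by
  rw [List.take_succ]
  congr 1
  rw [List.getElem?_eq_getElem (by rw [pvB_length]; exact hi)]
  rw [List.getD_eq_getElem _ _ (by rw [pvB_length]; exact hi)]
  rfl

theorem pv_foldB (cs : List Char) (i : Nat) (hi : i ≤ cs.length) :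
    (cs.take i).foldl (pvBStep cs) ([], pvRev cs) =
      ((pvB cs).take i, (pvRev cs).drop (pvT cs i)) := by
  induction i with
  | zero => simp [pvT]
  | succ i ih =>
    have hlt : i < cs.length := by omega
    rw [List.take_succ, List.getElem?_eq_getElem hlt]
    simp only [Option.toList_some]
    rw [List.foldl_append, ih (by omega), List.foldl_cons, List.foldl_nil]
    have hch : cs[i] = cs.getD i ' ' := (pv_getD_eq_getElem cs i hlt).symm
    have htest : ((pvCnt cs).getD cs[i] 0 % 2 == 0) = pvQ cs i := by
      rw [pv_cnt_getD, pv_parity0, hch, pvQ]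
    by_cases hq : pvQ cs i = true
    · rw [pvBStep, if_pos (by rw [htest]; exact hq)]
      rw [pv_take_succ_pvB cs i hlt, pvB_getD_even cs i hlt hq, hch]
      simp [pvT_succ, hq]
    · rw [pvBStep, if_neg (by rw [htest]; exact hq)]
      have ht : pvT cs i < (pvO cs).length := (pvT_lt cs i hlt hq).1
      have hrem : (pvRev cs).drop (pvT cs i) =
          (pvRev cs).getD (pvT cs i) ' ' :: (pvRev cs).drop (pvT cs i + 1) := by
        rw [List.drop_eq_getElem_cons (by rw [pv_R_len]; exact ht)]
        rw [List.getD_eq_getElem _ _ (by rw [pv_R_len]; exact ht)]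
      rw [hrem]
      rw [pv_take_succ_pvB cs i hlt, pvB_getD_odd cs i hlt hq,
        pv_R_getD cs (pvT cs i) ht]
      simp [pvT_succ, hq]

theorem pv_portB (cs : List Char) :
    (cs.foldl (pvBStep cs) ([], pvRev cs)).1 = pvB cs := by
  have h := pv_foldB cs cs.length le_rfl
  rw [List.take_length] at h
  rw [h]
  show (pvB cs).take cs.length = pvB cs
  rw [← pvB_length cs, List.take_length]

-- ===== VERDICT (by name: the statement is the Claim_ definition above) =====
theorem reverseOddCount_spec : Claim_equal_reverseOddCount := by
  intro str _
  unfold Spec_reverseOddCount reverseOddCount reverseOddCount_alt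
  simp only [pv_portB str.toList, pv_portA str.toList]
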